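-- pv_equiv track=rewrite | github.com/zeizyy/newsletter_curator | curator/evaluation.py | _metrics_from_classifier_rows
-- ===== SOURCE A (Python) =====
-- def _metrics_from_classifier_rows(rows: list[dict]) -> dict[str, int]:
--     metrics = {
--         "labels_reviewed": len(rows),
--         "uncertain_labels": 0,
--         "true_positives": 0,
--         "false_positives": 0,
--         "false_negatives": 0,
--         "true_negatives": 0,
--         "evaluated_labels": 0,
--     }
--     for row in rows:
--         agent_label = str(row.get("agent_label", "")).strip().lower()
--         classifier_status = str(row.get("classifier_status", "")).strip().lower()
--         if agent_label == "uncertain":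
--             metrics["uncertain_labels"] += 1
--             continue
--         metrics["evaluated_labels"] += 1
--         if classifier_status == "blocked" and agent_label == "blocked":
--             metrics["true_positives"] += 1
--         elif classifier_status == "blocked" and agent_label == "servable":
--             metrics["false_positives"] += 1
--         elif classifier_status != "blocked" and agent_label == "blocked":
--             metrics["false_negatives"] += 1
--         elif classifier_status != "blocked" and agent_label == "servable":
--             metrics["true_negatives"] += 1
--     return metrics
-- ===== SOURCE B (Python) =====
-- def _metrics_from_classifier_rows(rows: list[dict]) -> dict[str, int]:
--     pairs = [
--         (str(row.get("agent_label", "")).strip().lower(),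
--          str(row.get("classifier_status", "")).strip().lower() == "blocked")
--         for row in rows
--     ]
--     evaluated = [p for p in pairs if p[0] != "uncertain"]
--     return {
--         "labels_reviewed": len(pairs),
--         "uncertain_labels": len(pairs) - len(evaluated),
--         "true_positives": len([p for p in evaluated if p[1] and p[0] == "blocked"]),
--         "false_positives": len([p for p in evaluated if p[1] and p[0] == "servable"]),
--         "false_negatives": len([p for p in evaluated if not p[1] and p[0] == "blocked"]),
--         "true_negatives": len([p for p in evaluated if not p[1] and p[0] == "servable"]),
--         "evaluated_labels": len(evaluated),
--     }
-- ===== Notes on version B (the rewrite author's own statement) =====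
-- stated objective: simpler
-- what changed: Replaces A's mutable dict accumulator updated inside a loop with comprehensions: normalize all rows once into (label, blocked?) pairs, filter out 'uncertain' rows, and build the result dict directly from lengths of filtered lists.
import Mathlib
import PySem

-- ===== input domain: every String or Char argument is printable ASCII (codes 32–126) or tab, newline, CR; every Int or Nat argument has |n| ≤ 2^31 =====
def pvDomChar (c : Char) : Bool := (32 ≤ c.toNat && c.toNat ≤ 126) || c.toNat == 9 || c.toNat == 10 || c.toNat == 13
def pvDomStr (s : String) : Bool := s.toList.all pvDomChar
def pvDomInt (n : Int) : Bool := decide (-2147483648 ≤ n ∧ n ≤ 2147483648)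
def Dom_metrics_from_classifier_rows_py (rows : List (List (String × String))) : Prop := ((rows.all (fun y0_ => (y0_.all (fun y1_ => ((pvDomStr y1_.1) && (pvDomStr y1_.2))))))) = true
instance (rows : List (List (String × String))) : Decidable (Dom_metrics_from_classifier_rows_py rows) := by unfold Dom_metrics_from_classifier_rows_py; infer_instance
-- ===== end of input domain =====

-- B replaces A's mutable dict-accumulator loop by comprehensions: normalize once, filter out
-- 'uncertain' rows, and build the result from lengths of filtered lists (objective: simpler).

-- ===== PORT A =====
def metrics_from_classifier_rows_py (rows : List (List (String × String))) : List (String × Int) :=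
  let metrics : PySem.Dict String Int := PySem.Dict.mk
    [("labels_reviewed", (rows.length : Int)), ("uncertain_labels", 0), ("true_positives", 0),
     ("false_positives", 0), ("false_negatives", 0), ("true_negatives", 0), ("evaluated_labels", 0)]
  (rows.foldl (fun m row =>
    let agent_label := PySem.Str.lower (PySem.Str.strip (PySem.Dict.getD (PySem.Dict.mk row) "agent_label" ""))
    let classifier_status := PySem.Str.lower (PySem.Str.strip (PySem.Dict.getD (PySem.Dict.mk row) "classifier_status" ""))
    if agent_label == "uncertain" then m.modify "uncertain_labels" 0 (· + 1)
    else
      let m := m.modify "evaluated_labels" 0 (· + 1)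
      if classifier_status == "blocked" && agent_label == "blocked" then m.modify "true_positives" 0 (· + 1)
      else if classifier_status == "blocked" && agent_label == "servable" then m.modify "false_positives" 0 (· + 1)
      else if classifier_status != "blocked" && agent_label == "blocked" then m.modify "false_negatives" 0 (· + 1)
      else if classifier_status != "blocked" && agent_label == "servable" then m.modify "true_negatives" 0 (· + 1)
      else m) metrics).items

-- ===== PORT B =====
def metrics_from_classifier_rows_py_alt (rows : List (List (String × String))) : List (String × Int) :=
  let pairs := rows.map (fun row =>
    (PySem.Str.lower (PySem.Str.strip (PySem.Dict.getD (PySem.Dict.mk row) "agent_label" "")),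
     PySem.Str.lower (PySem.Str.strip (PySem.Dict.getD (PySem.Dict.mk row) "classifier_status" "")) == "blocked"))
  let evaluated := pairs.filter (fun p => p.1 != "uncertain")
  [("labels_reviewed", (pairs.length : Int)),
   ("uncertain_labels", (pairs.length : Int) - (evaluated.length : Int)),
   ("true_positives", ((evaluated.filter (fun p => p.2 && p.1 == "blocked")).length : Int)),
   ("false_positives", ((evaluated.filter (fun p => p.2 && p.1 == "servable")).length : Int)),
   ("false_negatives", ((evaluated.filter (fun p => !p.2 && p.1 == "blocked")).length : Int)),
   ("true_negatives", ((evaluated.filter (fun p => !p.2 && p.1 == "servable")).length : Int)),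
   ("evaluated_labels", (evaluated.length : Int))]

-- ===== PRECONDITION & SPEC =====
def Spec_metrics_from_classifier_rows_py (rows : List (List (String × String))) (out : List (String × Int)) : Prop := out = metrics_from_classifier_rows_py_alt rows
instance (rows : List (List (String × String))) (out : List (String × Int)) : Decidable (Spec_metrics_from_classifier_rows_py rows out) := by unfold Spec_metrics_from_classifier_rows_py; infer_instance

-- ===== CLAIM (what is proved, stated in full; the proofs are below) =====
def Claim_equal_metrics_from_classifier_rows_py : Prop := ∀ (rows : List (List (String × String))), Dom_metrics_from_classifier_rows_py rows → Spec_metrics_from_classifier_rows_py rows (metrics_from_classifier_rows_py rows)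

-- ===== LEMMAS AND PROOFS =====

-- normalized fields of one row
def pvAgent (row : List (String × String)) : String :=
  PySem.Str.lower (PySem.Str.strip (PySem.Dict.getD (PySem.Dict.mk row) "agent_label" ""))
def pvCs (row : List (String × String)) : String :=
  PySem.Str.lower (PySem.Str.strip (PySem.Dict.getD (PySem.Dict.mk row) "classifier_status" ""))

-- A's loop body as a named function (definitionally equal to the lambda in port A)
def pvStep (m : PySem.Dict String Int) (row : List (String × String)) : PySem.Dict String Int :=
  let agent_label := pvAgent row
  let classifier_status := pvCs row
  if agent_label == "uncertain" then m.modify "uncertain_labels" 0 (· + 1)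
  else
    let m := m.modify "evaluated_labels" 0 (· + 1)
    if classifier_status == "blocked" && agent_label == "blocked" then m.modify "true_positives" 0 (· + 1)
    else if classifier_status == "blocked" && agent_label == "servable" then m.modify "false_positives" 0 (· + 1)
    else if classifier_status != "blocked" && agent_label == "blocked" then m.modify "false_negatives" 0 (· + 1)
    else if classifier_status != "blocked" && agent_label == "servable" then m.modify "true_negatives" 0 (· + 1)
    else m

theorem pvStepU (n u tp fp fn tn ev : Int) :
    (PySem.Dict.mk
      [("labels_reviewed", n), ("uncertain_labels", u), ("true_positives", tp),
       ("false_positives", fp), ("false_negatives", fn), ("true_negatives", tn),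
       ("evaluated_labels", ev)]).modify "uncertain_labels" 0 (· + 1) =
    PySem.Dict.mk
      [("labels_reviewed", n), ("uncertain_labels", u + 1), ("true_positives", tp),
       ("false_positives", fp), ("false_negatives", fn), ("true_negatives", tn),
       ("evaluated_labels", ev)] := by
  simp [PySem.Dict.modify, PySem.Dict.insert, PySem.Dict.getD, PySem.Dict.get?, PySem.Dict.contains]

theorem pvStepNone (n u tp fp fn tn ev : Int) :
    (PySem.Dict.mk
      [("labels_reviewed", n), ("uncertain_labels", u), ("true_positives", tp),
       ("false_positives", fp), ("false_negatives", fn), ("true_negatives", tn),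
       ("evaluated_labels", ev)]).modify "evaluated_labels" 0 (· + 1) =
    PySem.Dict.mk
      [("labels_reviewed", n), ("uncertain_labels", u), ("true_positives", tp),
       ("false_positives", fp), ("false_negatives", fn), ("true_negatives", tn),
       ("evaluated_labels", ev + 1)] := by
  simp [PySem.Dict.modify, PySem.Dict.insert, PySem.Dict.getD, PySem.Dict.get?, PySem.Dict.contains]

theorem pvStepTP (n u tp fp fn tn ev : Int) :
    ((PySem.Dict.mk
      [("labels_reviewed", n), ("uncertain_labels", u), ("true_positives", tp),
       ("false_positives", fp), ("false_negatives", fn), ("true_negatives", tn),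
       ("evaluated_labels", ev)]).modify "evaluated_labels" 0 (· + 1)).modify "true_positives" 0 (· + 1) =
    PySem.Dict.mk
      [("labels_reviewed", n), ("uncertain_labels", u), ("true_positives", tp + 1),
       ("false_positives", fp), ("false_negatives", fn), ("true_negatives", tn),
       ("evaluated_labels", ev + 1)] := by
  simp [PySem.Dict.modify, PySem.Dict.insert, PySem.Dict.getD, PySem.Dict.get?, PySem.Dict.contains]

theorem pvStepFP (n u tp fp fn tn ev : Int) :
    ((PySem.Dict.mk
      [("labels_reviewed", n), ("uncertain_labels", u), ("true_positives", tp),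
       ("false_positives", fp), ("false_negatives", fn), ("true_negatives", tn),
       ("evaluated_labels", ev)]).modify "evaluated_labels" 0 (· + 1)).modify "false_positives" 0 (· + 1) =
    PySem.Dict.mk
      [("labels_reviewed", n), ("uncertain_labels", u), ("true_positives", tp),
       ("false_positives", fp + 1), ("false_negatives", fn), ("true_negatives", tn),
       ("evaluated_labels", ev + 1)] := by
  simp [PySem.Dict.modify, PySem.Dict.insert, PySem.Dict.getD, PySem.Dict.get?, PySem.Dict.contains]

theorem pvStepFN (n u tp fp fn tn ev : Int) :
    ((PySem.Dict.mk
      [("labels_reviewed", n), ("uncertain_labels", u), ("true_positives", tp),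
       ("false_positives", fp), ("false_negatives", fn), ("true_negatives", tn),
       ("evaluated_labels", ev)]).modify "evaluated_labels" 0 (· + 1)).modify "false_negatives" 0 (· + 1) =
    PySem.Dict.mk
      [("labels_reviewed", n), ("uncertain_labels", u), ("true_positives", tp),
       ("false_positives", fp), ("false_negatives", fn + 1), ("true_negatives", tn),
       ("evaluated_labels", ev + 1)] := by
  simp [PySem.Dict.modify, PySem.Dict.insert, PySem.Dict.getD, PySem.Dict.get?, PySem.Dict.contains]

theorem pvStepTN (n u tp fp fn tn ev : Int) :
    ((PySem.Dict.mk
      [("labels_reviewed", n), ("uncertain_labels", u), ("true_positives", tp),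
       ("false_positives", fp), ("false_negatives", fn), ("true_negatives", tn),
       ("evaluated_labels", ev)]).modify "evaluated_labels" 0 (· + 1)).modify "true_negatives" 0 (· + 1) =
    PySem.Dict.mk
      [("labels_reviewed", n), ("uncertain_labels", u), ("true_positives", tp),
       ("false_positives", fp), ("false_negatives", fn), ("true_negatives", tn + 1),
       ("evaluated_labels", ev + 1)] := by
  simp [PySem.Dict.modify, PySem.Dict.insert, PySem.Dict.getD, PySem.Dict.get?, PySem.Dict.contains]

-- A's fold, starting from an arbitrary metrics state, adds B's counts to each field
-- A's fold, starting from an arbitrary metrics state, adds B's counts to each field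
theorem foldA_items (rows : List (List (String × String))) (n u tp fp fn tn ev : Int) :
    (rows.foldl pvStep
      (PySem.Dict.mk
        [("labels_reviewed", n), ("uncertain_labels", u), ("true_positives", tp),
         ("false_positives", fp), ("false_negatives", fn), ("true_negatives", tn),
         ("evaluated_labels", ev)])).items =
    (let pairs := rows.map (fun row => (pvAgent row, pvCs row == "blocked"))
     let evl := pairs.filter (fun p => p.1 != "uncertain")
     [("labels_reviewed", n),
      ("uncertain_labels", u + ((pairs.length : Int) - (evl.length : Int))),
      ("true_positives", tp + ((evl.filter (fun p => p.2 && p.1 == "blocked")).length : Int)),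
      ("false_positives", fp + ((evl.filter (fun p => p.2 && p.1 == "servable")).length : Int)),
      ("false_negatives", fn + ((evl.filter (fun p => !p.2 && p.1 == "blocked")).length : Int)),
      ("true_negatives", tn + ((evl.filter (fun p => !p.2 && p.1 == "servable")).length : Int)),
      ("evaluated_labels", ev + (evl.length : Int))]) := by
  induction rows generalizing n u tp fp fn tn ev with
  | nil => simp
  | cons r rs ih =>
    rw [List.foldl_cons]
    by_cases hu : pvAgent r = "uncertain"
    · have hs : pvStep (PySem.Dict.mk
        [("labels_reviewed", n), ("uncertain_labels", u), ("true_positives", tp),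
         ("false_positives", fp), ("false_negatives", fn), ("true_negatives", tn),
         ("evaluated_labels", ev)]) r = PySem.Dict.mk
        [("labels_reviewed", n), ("uncertain_labels", u + 1), ("true_positives", tp),
         ("false_positives", fp), ("false_negatives", fn), ("true_negatives", tn),
         ("evaluated_labels", ev)] := by
        simp [pvStep, hu, pvStepU]
      rw [hs, ih]
      simp [hu]
      omega
    · by_cases hab : pvAgent r = "blocked"
      · by_cases hb : pvCs r = "blocked"
        · have hs : pvStep (PySem.Dict.mk
            [("labels_reviewed", n), ("uncertain_labels", u), ("true_positives", tp), ("false_positives", fp), ("false_negatives", fn), ("true_negatives", tn), ("evaluated_labels", ev)]) r = PySem.Dict.mk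
            [("labels_reviewed", n), ("uncertain_labels", u), ("true_positives", tp + 1), ("false_positives", fp), ("false_negatives", fn), ("true_negatives", tn), ("evaluated_labels", ev + 1)] := by
            simp [pvStep, hu, hab, hb, pvStepTP]
          rw [hs, ih]
          simp [hu, hab, hb]
          omega
        · have hs : pvStep (PySem.Dict.mk
            [("labels_reviewed", n), ("uncertain_labels", u), ("true_positives", tp), ("false_positives", fp), ("false_negatives", fn), ("true_negatives", tn), ("evaluated_labels", ev)]) r = PySem.Dict.mk
            [("labels_reviewed", n), ("uncertain_labels", u), ("true_positives", tp), ("false_positives", fp), ("false_negatives", fn + 1), ("true_negatives", tn), ("evaluated_labels", ev + 1)] := by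
            simp [pvStep, hu, hab, hb, pvStepFN]
          rw [hs, ih]
          simp [hu, hab, hb]
          omega
      · by_cases has : pvAgent r = "servable"
        · by_cases hb : pvCs r = "blocked"
          · have hs : pvStep (PySem.Dict.mk
              [("labels_reviewed", n), ("uncertain_labels", u), ("true_positives", tp), ("false_positives", fp), ("false_negatives", fn), ("true_negatives", tn), ("evaluated_labels", ev)]) r = PySem.Dict.mk
              [("labels_reviewed", n), ("uncertain_labels", u), ("true_positives", tp), ("false_positives", fp + 1), ("false_negatives", fn), ("true_negatives", tn), ("evaluated_labels", ev + 1)] := by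
              simp [pvStep, hu, hab, has, hb, pvStepFP]
            rw [hs, ih]
            simp [hu, hab, has, hb]
            omega
          · have hs : pvStep (PySem.Dict.mk
              [("labels_reviewed", n), ("uncertain_labels", u), ("true_positives", tp), ("false_positives", fp), ("false_negatives", fn), ("true_negatives", tn), ("evaluated_labels", ev)]) r = PySem.Dict.mk
              [("labels_reviewed", n), ("uncertain_labels", u), ("true_positives", tp), ("false_positives", fp), ("false_negatives", fn), ("true_negatives", tn + 1), ("evaluated_labels", ev + 1)] := by
              simp [pvStep, hu, hab, has, hb, pvStepTN]
            rw [hs, ih]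
            simp [hu, hab, has, hb]
            omega
        · have hs : pvStep (PySem.Dict.mk
            [("labels_reviewed", n), ("uncertain_labels", u), ("true_positives", tp), ("false_positives", fp), ("false_negatives", fn), ("true_negatives", tn), ("evaluated_labels", ev)]) r = PySem.Dict.mk
            [("labels_reviewed", n), ("uncertain_labels", u), ("true_positives", tp), ("false_positives", fp), ("false_negatives", fn), ("true_negatives", tn), ("evaluated_labels", ev + 1)] := by
            simp [pvStep, hu, hab, has, pvStepNone]
          rw [hs, ih]
          simp [hu, hab, has]
          omega

-- ===== VERDICT (by name: the statement is the Claim_ definition above) =====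
theorem metrics_from_classifier_rows_py_spec : Claim_equal_metrics_from_classifier_rows_py := by
  intro rows _
  unfold Spec_metrics_from_classifier_rows_py
  have e : metrics_from_classifier_rows_py rows = (rows.foldl pvStep (PySem.Dict.mk
      [("labels_reviewed", (rows.length : Int)), ("uncertain_labels", 0), ("true_positives", 0),
       ("false_positives", 0), ("false_negatives", 0), ("true_negatives", 0),
       ("evaluated_labels", 0)])).items := rfl
  rw [e, foldA_items]
  simp [metrics_from_classifier_rows_py_alt, pvAgent, pvCs]
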